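-- pv_equiv track=rewrite | github.com/Gnegnery/Projet-Bio | .ipynb_checkpoints/motifsSearch-checkpoint.py | removeLowComplexeHomo
-- ===== SOURCE A (Python) =====
-- def removeLowComplexeHomo(motifs:list, m:int):
--     """
--     Enlève les motifs peu complexe ayant m fois le même nucléotide
--     entrée motifs: liste de motifs
--     entrée m: nombre de nucleotides répétés dans un motif peu complexe
--     sortie motifsClean: liste de motifs sans les motifs peu complexe
--     >>>removeLowComplexeHomo(['TAA', 'AAG', 'AGT', 'GTA', 'TAT', 'ATA', 'CTA', 'ATC'], 2)
--     ['AGT', 'GTA', 'CTA', 'ATC']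
--     """
--
--     motifsClean = []
--     for mot in motifs:
--         freqLettre = {}
--         most = 0
--         for c in mot:
--             if c in freqLettre:
--                 freqLettre[c] += 1
--             else :
--                 freqLettre[c] = 1
--
--             if freqLettre[c] > most:
--                 most = freqLettre[c]
--
--         if most < m:
--             motifsClean.append(mot)
--
--     return motifsClean
-- ===== SOURCE B (Python) =====
-- def _most(mot):
--     best = 0
--     for c in set(mot):
--         best = max(best, mot.count(c))
--     return best
--
--
-- def removeLowComplexeHomo(motifs: list, m: int):
--     return [mot for mot in motifs if _most(mot) < m]
-- ===== Notes on version B (the rewrite author's own statement) =====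
-- stated objective: simpler
-- what changed: Replaces A's per-motif hash-map of letter frequencies with a maintained running maximum by a comprehension that, for each distinct letter of the motif (set(mot)), rescans the motif with mot.count and keeps the motif when the largest such count is below m.
import Mathlib
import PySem

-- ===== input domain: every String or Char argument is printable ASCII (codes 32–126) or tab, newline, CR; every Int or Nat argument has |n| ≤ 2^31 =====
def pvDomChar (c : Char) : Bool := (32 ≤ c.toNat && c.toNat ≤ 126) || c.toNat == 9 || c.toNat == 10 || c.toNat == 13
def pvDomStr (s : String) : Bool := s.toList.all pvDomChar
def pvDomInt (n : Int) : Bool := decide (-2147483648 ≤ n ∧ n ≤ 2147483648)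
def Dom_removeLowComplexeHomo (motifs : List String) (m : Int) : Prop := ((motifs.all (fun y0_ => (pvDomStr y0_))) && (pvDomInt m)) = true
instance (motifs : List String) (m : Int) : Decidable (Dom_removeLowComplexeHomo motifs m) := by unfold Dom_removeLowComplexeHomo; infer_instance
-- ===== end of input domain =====

-- B replaces A's per-motif frequency dict + running maximum by a per-distinct-letter count rescan
-- (max of mot.count(c) over set(mot)); objective: simpler, same asymptotic cost on a small alphabet.

-- ===== PORT A =====
-- A's inner loop over one motif: the dict freqLettre and the running maximum 'most'.
-- 'freqLettre[c] += 1' is d.insert c (d.getD c 0 + 1) (the key is present, overwrite keeps position);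
-- 'freqLettre[c] = 1' is d.insert c 1; 'freqLettre[c] > most' reads the just-updated entry.
def pvAStep (st : PySem.Dict Char Int × Int) (c : Char) : PySem.Dict Char Int × Int :=
  let d := if st.1.contains c then st.1.insert c (st.1.getD c 0 + 1) else st.1.insert c 1
  let most := if d.getD c 0 > st.2 then d.getD c 0 else st.2
  (d, most)

def pvAMost (mot : List Char) : PySem.Dict Char Int × Int :=
  mot.foldl pvAStep (PySem.Dict.empty, 0)

def removeLowComplexeHomo (motifs : List String) (m : Int) : List String :=
  motifs.foldl (fun motifsClean mot =>
    if (pvAMost mot.toList).2 < m then motifsClean ++ [mot] else motifsClean) []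

-- ===== PORT B =====
-- B's helper _most: best = 0; for c in set(mot): best = max(best, mot.count(c))
def pvBMost (mot : List Char) : Int :=
  (PySem.Set.ofList mot).foldl (fun best c => max best ((mot.count c : Int))) 0

def removeLowComplexeHomo_alt (motifs : List String) (m : Int) : List String :=
  motifs.filter (fun mot => decide (pvBMost mot.toList < m))

-- ===== PRECONDITION & SPEC =====
def Spec_removeLowComplexeHomo (motifs : List String) (m : Int) (out : List String) : Prop := out = removeLowComplexeHomo_alt motifs m
instance (motifs : List String) (m : Int) (out : List String) : Decidable (Spec_removeLowComplexeHomo motifs m out) := by unfold Spec_removeLowComplexeHomo; infer_instance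

-- ===== CLAIM (what is proved, stated in full; the proofs are below) =====
def Claim_equal_removeLowComplexeHomo : Prop := ∀ (motifs : List String) (m : Int), Dom_removeLowComplexeHomo motifs m → Spec_removeLowComplexeHomo motifs m (removeLowComplexeHomo motifs m)

-- ===== LEMMAS AND PROOFS =====

-- characterisation shared by both programs: v is an upper bound of the letter counts and is 0 or attained
def pvIsMost (l : List Char) (v : Int) : Prop :=
  (∀ c ∈ l, (l.count c : Int) ≤ v) ∧ (v = 0 ∨ ∃ c ∈ l, (l.count c : Int) = v)

theorem pvIsMost_unique {l : List Char} {v w : Int} (hv : pvIsMost l v) (hw : pvIsMost l w) : v = w := by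
  obtain ⟨hvub, hvat⟩ := hv
  obtain ⟨hwub, hwat⟩ := hw
  rcases hvat with hv0 | ⟨c, hc, hcv⟩ <;> rcases hwat with hw0 | ⟨d, hd, hdw⟩
  · omega
  · have h1 := hvub d hd
    have h2 : (1 : Int) ≤ (l.count d : Int) := by
      have := List.one_le_count_iff.mpr hd
      exact_mod_cast this
    omega
  · have h1 := hwub c hc
    have h2 : (1 : Int) ≤ (l.count c : Int) := by
      have := List.one_le_count_iff.mpr hc
      exact_mod_cast this
    omega
  · have h1 := hwub c hc
    have h2 := hvub d hd
    omega

-- the dict branch of A's step is always an 'insert c (old + 1)'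
theorem pvAStep_dict (d : PySem.Dict Char Int) (c : Char) :
    (if d.contains c then d.insert c (d.getD c 0 + 1) else d.insert c 1) = d.insert c (d.getD c 0 + 1) := by
  by_cases h : d.contains c = true
  · simp [h]
  · have h' : d.contains c = false := by simpa using h
    rw [if_neg (by simp [h']), PySem.Dict.getD_of_not_contains d 0 h']
    norm_num

-- the dict A maintains is the counting fold
theorem pvAMost_fst_gen (l : List Char) :
    ∀ (d : PySem.Dict Char Int) (most : Int),
      (l.foldl pvAStep (d, most)).1 = l.foldl (fun d c => d.insert c (d.getD c 0 + 1)) d := by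
  induction l with
  | nil => intro d most; rfl
  | cons c l ih =>
      intro d most
      simp only [List.foldl_cons]
      have hstep : pvAStep (d, most) c =
          (d.insert c (d.getD c 0 + 1),
           if (d.insert c (d.getD c 0 + 1)).getD c 0 > most then (d.insert c (d.getD c 0 + 1)).getD c 0 else most) := by
        simp only [pvAStep, pvAStep_dict]
      rw [hstep, ih]

theorem pvAMost_getD (l : List Char) (c : Char) :
    (pvAMost l).1.getD c 0 = (l.count c : Int) := by
  unfold pvAMost
  rw [pvAMost_fst_gen]
  rw [PySem.Dict.getD_foldl_insert_add_one]
  simp [PySem.Dict.getD_empty]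

theorem pvAMost_snd_isMost (l : List Char) : pvIsMost l (pvAMost l).2 := by
  induction l using List.reverseRecOn with
  | nil =>
      constructor
      · intro c hc; cases hc
      · left; rfl
  | append_singleton l a ih =>
      have hfold : pvAMost (l ++ [a]) = pvAStep (pvAMost l) a := by
        unfold pvAMost; rw [List.foldl_append]; rfl
      have hdict : (if (pvAMost l).1.contains a then (pvAMost l).1.insert a ((pvAMost l).1.getD a 0 + 1) else (pvAMost l).1.insert a 1)
          = (pvAMost l).1.insert a ((pvAMost l).1.getD a 0 + 1) := pvAStep_dict _ _
      have hget : ((pvAMost l).1.insert a ((pvAMost l).1.getD a 0 + 1)).getD a 0 = (l.count a : Int) + 1 := by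
        rw [PySem.Dict.getD_insert_self, pvAMost_getD]
      have hsnd : (pvAMost (l ++ [a])).2 = max (pvAMost l).2 ((l.count a : Int) + 1) := by
        rw [hfold]
        simp only [pvAStep, hdict, hget]
        by_cases h : ((l.count a : Int) + 1) ≤ (pvAMost l).2
        · rw [if_neg (by omega), max_eq_left h]
        · rw [if_pos (by omega), max_eq_right (by omega)]
      obtain ⟨ihub, ihat⟩ := ih
      rw [hsnd]
      constructor
      · intro c hc
        by_cases hca : c = a
        · subst hca
          have hcnt : (l ++ [c]).count c = l.count c + 1 := by simp
          rw [hcnt]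
          calc ((l.count c + 1 : Nat) : Int) = (l.count c : Int) + 1 := by push_cast; ring
            _ ≤ max (pvAMost l).2 ((l.count c : Int) + 1) := le_max_right _ _
        · have hcl : c ∈ l := by
            rcases List.mem_append.mp hc with h' | h'
            · exact h'
            · simp at h'; exact absurd h' hca
          have hcount : (l ++ [a]).count c = l.count c := by
            simp [List.count_append, Ne.symm hca]
          rw [hcount]
          exact le_trans (ihub c hcl) (le_max_left _ _)
      · right
        by_cases h : (pvAMost l).2 ≤ ((l.count a : Int) + 1)
        · refine ⟨a, by simp, ?_⟩
          have hcnt : (l ++ [a]).count a = l.count a + 1 := by simp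
          rw [hcnt, max_eq_right h]
          push_cast
          ring
        · rcases ihat with h0 | ⟨c, hc, hcv⟩
          · exact absurd h (by omega)
          · have hca : c ≠ a := by
              intro he; subst he
              omega
            refine ⟨c, List.mem_append.mpr (Or.inl hc), ?_⟩
            have hcount : (l ++ [a]).count c = l.count c := by
              simp [List.count_append, Ne.symm hca]
            rw [hcount, hcv, max_eq_left (by omega)]

theorem pvBMost_isMost (l : List Char) : pvIsMost l (pvBMost l) := by
  have hmap : pvBMost l = ((PySem.Set.ofList l).map (fun c => (l.count c : Int))).foldl max 0 := by
    rw [List.foldl_map]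
    rfl
  constructor
  · intro c hc
    rw [hmap]
    exact (PySem.List.le_foldl_max _ 0).2 _ (List.mem_map.mpr ⟨c, (PySem.Set.mem_ofList l c).mpr hc, rfl⟩)
  · rw [hmap]
    rcases PySem.List.foldl_max_mem ((PySem.Set.ofList l).map (fun c => (l.count c : Int))) 0 with h | h
    · left; exact h
    · right
      obtain ⟨c, hc, hcv⟩ := List.mem_map.mp h
      exact ⟨c, (PySem.Set.mem_ofList l c).mp hc, hcv⟩

theorem pvMost_eq (l : List Char) : (pvAMost l).2 = pvBMost l :=
  pvIsMost_unique (pvAMost_snd_isMost l) (pvBMost_isMost l)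

-- ===== VERDICT (by name: the statement is the Claim_ definition above) =====
theorem removeLowComplexeHomo_spec : Claim_equal_removeLowComplexeHomo := by
  intro motifs m _
  unfold Spec_removeLowComplexeHomo removeLowComplexeHomo removeLowComplexeHomo_alt
  have hbody : (fun (motifsClean : List String) (mot : String) =>
      if (pvAMost mot.toList).2 < m then motifsClean ++ [mot] else motifsClean)
      = (fun motifsClean mot =>
      if (fun mot : String => decide (pvBMost mot.toList < m)) mot = true then motifsClean ++ [id mot] else motifsClean) := by
    funext acc mot
    simp [pvMost_eq]
  rw [hbody, PySem.List.foldl_append_if]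
  simp
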